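-- pv_equiv track=rewrite | github.com/utkucanbolat/GaltonBoard | plotter.py | accumulate_data
-- ===== SOURCE A (Python) =====
-- def accumulate_data(data):
--     processed_data = []
--     elements_seen = []
--
--     for row in data:
--         # Extract all elements except the first one (assuming the first one is x-value)
--         current_elements = row[1:]
--
--         # Update the list of seen elements
--         for element in current_elements:
--             if element not in elements_seen:
--                 elements_seen.append(element)
--
--         # Create a new data point with the x value and the accumulated elements
--         new_data_point = [row[0]] + elements_seen.copy()
--         processed_data.append(new_data_point)
--
--     return processed_data
-- ===== SOURCE B (Python) =====
-- def accumulate_data(data):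
--     # Pass 1: hash-map each element to the index of the row where it first appears
--     # (dict preserves first-seen insertion order; no linear membership scans).
--     first_row = {}
--     for i, row in enumerate(data):
--         for element in row[1:]:
--             if element not in first_row:
--                 first_row[element] = i
--     # Pass 2: each output row keeps the elements first seen at or before its index.
--     return [[row[0]] + [e for e, j in first_row.items() if j <= i]
--             for i, row in enumerate(data)]
-- ===== Notes on version B (the rewrite author's own statement) =====
-- stated objective: alternative
-- what changed: Replaces A's growing seen-list with linear membership tests and per-row copying by a hash dict mapping each element to its first-occurrence row index, then materialising each output row by filtering the dict's items on that index.
import Mathlib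
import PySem

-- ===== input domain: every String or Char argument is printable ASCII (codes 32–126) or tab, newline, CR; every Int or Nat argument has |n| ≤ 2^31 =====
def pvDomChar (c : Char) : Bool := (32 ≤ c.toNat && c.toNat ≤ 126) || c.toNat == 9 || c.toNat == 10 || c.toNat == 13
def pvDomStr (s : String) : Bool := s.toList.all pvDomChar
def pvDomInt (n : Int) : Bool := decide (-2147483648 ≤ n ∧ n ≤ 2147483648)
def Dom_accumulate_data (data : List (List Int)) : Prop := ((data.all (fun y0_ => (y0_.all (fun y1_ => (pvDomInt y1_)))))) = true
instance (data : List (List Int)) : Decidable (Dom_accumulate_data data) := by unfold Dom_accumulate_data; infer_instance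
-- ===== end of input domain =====

-- B replaces A's growing seen-list (linear membership tests, copied per row) by a dict
-- element ↦ first-occurrence row index, each output row filtering the dict's items; same results.

-- ===== PORT A =====
-- A: one pass; grow elements_seen per row and copy it into the output row.
def accumulate_data (data : List (List Int)) : List (List Int) :=
  (data.foldl (fun (st : List (List Int) × List Int) row =>
      let seen := (PySem.List.slice row (some 1) none).foldl
        (fun s e => if e ∈ s then s else s ++ [e]) st.2
      (st.1 ++ [[(PySem.List.pyGet? row 0).getD 0] ++ seen], seen))
    ([], [])).1

-- ===== PORT B =====
-- B: pass 1 builds the dict element ↦ first row index; pass 2 filters its items per row.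
def accumulate_data_alt (data : List (List Int)) : List (List Int) :=
  let first := (PySem.List.enumerate data).foldl
    (fun (d : PySem.Dict Int Int) ir =>
      (PySem.List.slice ir.2 (some 1) none).foldl
        (fun d e => if d.contains e then d else d.insert e ir.1) d)
    PySem.Dict.empty
  (PySem.List.enumerate data).map (fun ir =>
    [(PySem.List.pyGet? ir.2 0).getD 0] ++
      (first.items.filter (fun ej => ej.2 ≤ ir.1)).map Prod.fst)

-- ===== PRECONDITION & SPEC =====
-- Pre_ excludes exactly the inputs containing an empty row, on which A (and B) raise IndexError at row[0].
def Pre_accumulate_data (data : List (List Int)) : Prop := ∀ row ∈ data, row ≠ []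
instance (data : List (List Int)) : Decidable (Pre_accumulate_data data) := by unfold Pre_accumulate_data; infer_instance
def pvWitness_accumulate_data : List (List Int) := [[0, 2, 3], [1, 3], [5]]
def Spec_accumulate_data (data : List (List Int)) (out : List (List Int)) : Prop := out = accumulate_data_alt data
instance (data : List (List Int)) (out : List (List Int)) : Decidable (Spec_accumulate_data data out) := by unfold Spec_accumulate_data; infer_instance

-- ===== CLAIM (what is proved, stated in full; the proofs are below) =====
def Claim_equal_accumulate_data : Prop := ∀ (data : List (List Int)), Dom_accumulate_data data → Pre_accumulate_data data → Spec_accumulate_data data (accumulate_data data)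

-- ===== LEMMAS AND PROOFS =====

-- A's per-row update of the seen list
def pvStep (s : List Int) (row : List Int) : List Int :=
  (PySem.List.slice row (some 1) none).foldl (fun s e => if e ∈ s then s else s ++ [e]) s

-- A's loop, recursively
def pvALoop (s : List Int) (rows : List (List Int)) : List (List Int) :=
  match rows with
  | [] => []
  | r :: t => ([(PySem.List.pyGet? r 0).getD 0] ++ pvStep s r) :: pvALoop (pvStep s r) t

theorem accA_foldl (rows : List (List Int)) (acc : List (List Int)) (s : List Int) :
    (rows.foldl (fun (st : List (List Int) × List Int) row =>
      let seen := (PySem.List.slice row (some 1) none).foldl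
        (fun s e => if e ∈ s then s else s ++ [e]) st.2
      (st.1 ++ [[(PySem.List.pyGet? row 0).getD 0] ++ seen], seen)) (acc, s)).1
      = acc ++ pvALoop s rows := by
  induction rows generalizing acc s with
  | nil => simp [pvALoop]
  | cons r t ih =>
    simp only [List.foldl_cons, pvALoop]
    rw [ih]
    simp [pvStep, List.append_assoc]

-- dict-building as a pure function on item lists
def pvIStep (ps : List (Int × Int)) (i : Int) (l : List Int) : List (Int × Int) :=
  l.foldl (fun ps e => if e ∈ ps.map Prod.fst then ps else ps ++ [(e, i)]) ps

def pvIBuild (ps : List (Int × Int)) (i : Int) (rows : List (List Int)) : List (Int × Int) :=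
  match rows with
  | [] => ps
  | r :: t => pvIBuild (pvIStep ps i (PySem.List.slice r (some 1) none)) (i + 1) t

-- the dict loop's items are pvIStep of its items
theorem dict_step_items (l : List Int) (d : PySem.Dict Int Int) (i : Int) :
    (l.foldl (fun d e => if d.contains e then d else d.insert e i) d).items
      = pvIStep d.items i l := by
  induction l generalizing d with
  | nil => rfl
  | cons e t ih =>
    simp only [pvIStep, List.foldl_cons] at ih ⊢
    by_cases h : e ∈ d.items.map Prod.fst
    · have hc : d.contains e = true := by
        rw [PySem.Dict.contains_eq_decide_mem_keys]
        simpa [PySem.Dict.keys] using h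
      rw [if_pos hc, if_pos h]
      exact ih d
    · have hc : d.contains e = false := by
        rw [PySem.Dict.contains_eq_decide_mem_keys]
        simpa [PySem.Dict.keys] using h
      rw [if_neg (by simp [hc]), if_neg h, ih (d.insert e i),
        PySem.Dict.items_insert_of_not_contains (h := hc)]

theorem dict_build_items (rows : List (List Int)) (i : Int) (d : PySem.Dict Int Int) :
    ((PySem.List.enumerate rows i).foldl
      (fun (d : PySem.Dict Int Int) ir =>
        (PySem.List.slice ir.2 (some 1) none).foldl
          (fun d e => if d.contains e then d else d.insert e ir.1) d) d).items
      = pvIBuild d.items i rows := by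
  induction rows generalizing i d with
  | nil => rfl
  | cons r t ih =>
    rw [PySem.List.enumerate_cons, List.foldl_cons, ih, pvIBuild,
      dict_step_items]

-- keys of pvIStep follow A's dedup step
theorem iStep_fst (l : List Int) (ps : List (Int × Int)) (i : Int) :
    (pvIStep ps i l).map Prod.fst
      = l.foldl (fun s e => if e ∈ s then s else s ++ [e]) (ps.map Prod.fst) := by
  induction l generalizing ps with
  | nil => rfl
  | cons e t ih =>
    simp only [pvIStep, List.foldl_cons] at *
    by_cases h : e ∈ ps.map Prod.fst
    · simp [h, ih]
    · simp only [h, if_false]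
      rw [ih]
      simp

-- pvIStep only appends pairs carrying the current index
theorem iStep_append (l : List Int) (ps : List (Int × Int)) (i : Int) :
    ∃ rest, pvIStep ps i l = ps ++ rest ∧ ∀ p ∈ rest, p.2 = i := by
  induction l generalizing ps with
  | nil => exact ⟨[], by simp [pvIStep]⟩
  | cons e t ih =>
    simp only [pvIStep, List.foldl_cons]
    by_cases h : e ∈ ps.map Prod.fst
    · simpa [h, pvIStep] using ih ps
    · obtain ⟨rest, hr, hv⟩ := ih (ps ++ [(e, i)])
      refine ⟨(e, i) :: rest, by simpa [pvIStep, h] using hr, ?_⟩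
      intro p hp
      rcases List.mem_cons.mp hp with hp | hp
      · simp [hp]
      · exact hv p hp

-- pvIBuild only appends pairs with index ≥ i
theorem iBuild_append (rows : List (List Int)) (ps : List (Int × Int)) (i : Int) :
    ∃ rest, pvIBuild ps i rows = ps ++ rest ∧ ∀ p ∈ rest, i ≤ p.2 := by
  induction rows generalizing ps i with
  | nil => exact ⟨[], by simp [pvIBuild]⟩
  | cons r t ih =>
    obtain ⟨r1, h1, hv1⟩ := iStep_append (PySem.List.slice r (some 1) none) ps i
    obtain ⟨r2, h2, hv2⟩ := ih (pvIStep ps i (PySem.List.slice r (some 1) none)) (i + 1)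
    refine ⟨r1 ++ r2, ?_, ?_⟩
    · rw [pvIBuild, h2, h1]; simp
    · intro p hp
      rcases List.mem_append.mp hp with hp | hp
      · exact le_of_eq (hv1 p hp).symm
      · exact le_of_lt (lt_of_lt_of_le (by omega) (hv2 p hp))

-- the main correspondence: B's reconstruction pass equals A's loop
theorem main_corr (rows : List (List Int)) (i : Int) (ps : List (Int × Int))
    (F : List (Int × Int)) (hF : F = pvIBuild ps i rows)
    (hlt : ∀ p ∈ ps, p.2 < i) :
    (PySem.List.enumerate rows i).map (fun ir =>
      [(PySem.List.pyGet? ir.2 0).getD 0] ++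
        (F.filter (fun ej => ej.2 ≤ ir.1)).map Prod.fst)
      = pvALoop (ps.map Prod.fst) rows := by
  induction rows generalizing i ps with
  | nil => simp [pvALoop]
  | cons r t ih =>
    rw [PySem.List.enumerate_cons, List.map_cons, pvALoop]
    have hF' : F = pvIBuild (pvIStep ps i (PySem.List.slice r (some 1) none)) (i + 1) t := hF
    congr 1
    · -- head row
      obtain ⟨r1, h1, hv1⟩ := iStep_append (PySem.List.slice r (some 1) none) ps i
      obtain ⟨r2, h2, hv2⟩ := iBuild_append t (pvIStep ps i (PySem.List.slice r (some 1) none)) (i + 1)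
      have : F.filter (fun ej => ej.2 ≤ i) = pvIStep ps i (PySem.List.slice r (some 1) none) := by
        rw [hF', h2, List.filter_append, h1]
        have e1 : r2.filter (fun ej => ej.2 ≤ i) = [] := by
          apply List.filter_eq_nil_iff.mpr
          intro p hp
          have := hv2 p hp
          simp; omega
        have e2 : (ps ++ r1).filter (fun ej => ej.2 ≤ i) = ps ++ r1 := by
          apply List.filter_eq_self.mpr
          intro p hp
          rcases List.mem_append.mp hp with hp | hp
          · have := hlt p hp; simp; omega
          · have := hv1 p hp; simp; omega
        rw [e1, e2, List.append_nil]
      rw [this]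
      congr 1
      rw [iStep_fst]
      rfl
    · -- tail rows
      have hlt' : ∀ p ∈ pvIStep ps i (PySem.List.slice r (some 1) none), p.2 < i + 1 := by
        obtain ⟨r1, h1, hv1⟩ := iStep_append (PySem.List.slice r (some 1) none) ps i
        rw [h1]
        intro p hp
        rcases List.mem_append.mp hp with hp | hp
        · exact lt_trans (hlt p hp) (by omega)
        · rw [hv1 p hp]; omega
      rw [ih (i + 1) (pvIStep ps i (PySem.List.slice r (some 1) none)) hF' hlt',
        iStep_fst]
      rfl

-- ===== VERDICT (by name: the statement is the Claim_ definition above) =====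
theorem accumulate_data_spec : Claim_equal_accumulate_data := by
  intro data _ _
  unfold Spec_accumulate_data accumulate_data accumulate_data_alt
  rw [accA_foldl data [] []]
  simp only [List.nil_append]
  refine (main_corr data 0 [] _ ?_ (by simp)).symm
  rw [dict_build_items]
  rfl
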